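-- pv_equiv track=rewrite | github.com/haolunc/ARC-RL | reference_solutions/solutions/62c24649.py | transform
-- ===== SOURCE A (Python) =====
-- def transform(grid):
--
--     A = grid
--
--     A_hor = [row[::-1] for row in A]
--
--     A_vert = A[::-1]
--
--     A_rot180 = [row[::-1] for row in A_vert]
--
--     top = [A[i] + A_hor[i] for i in range(3)]
--
--     bottom = [A_vert[i] + A_rot180[i] for i in range(3)]
--     return top + bottom
-- ===== SOURCE B (Python) =====
-- def transform(grid):
--     n = len(grid)
--     out = []
--     for i in range(6):
--         mi = i if i < 3 else n - 1 - (i - 3)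
--         row = grid[mi]
--         w = len(row)
--         out.append([row[j if j < w else 2 * w - 1 - j] for j in range(2 * w)])
--     return out
-- ===== Notes on version B (the rewrite author's own statement) =====
-- stated objective: alternative
-- what changed: B builds the 6-row output directly by computing a mirrored source index for every output cell (index reflection) instead of materializing the reflected grids A_hor/A_vert/A_rot180 and concatenating blocks.
import Mathlib
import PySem

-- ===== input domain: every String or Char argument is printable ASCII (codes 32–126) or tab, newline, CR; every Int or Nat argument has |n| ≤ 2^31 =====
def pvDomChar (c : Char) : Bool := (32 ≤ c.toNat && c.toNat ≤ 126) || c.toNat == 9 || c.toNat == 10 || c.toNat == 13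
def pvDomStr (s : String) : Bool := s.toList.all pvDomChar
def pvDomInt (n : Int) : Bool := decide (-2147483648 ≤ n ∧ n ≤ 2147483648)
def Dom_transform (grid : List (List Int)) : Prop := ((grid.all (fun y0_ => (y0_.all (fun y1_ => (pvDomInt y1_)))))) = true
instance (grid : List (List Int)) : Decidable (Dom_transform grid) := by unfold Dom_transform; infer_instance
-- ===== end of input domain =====

-- B replaces A's block construction (reflected sub-grids A_hor/A_vert/A_rot180 concatenated) by
-- per-cell mirrored index arithmetic; objective: alternative decomposition, same cost.

-- ===== PORT A =====
-- row[::-1] / A[::-1] are ported as List.reverse (PySem.List.slice?_none_none_neg_one);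
-- A[i] (in range under Pre_) is ported with pyGetD.
def transform (grid : List (List Int)) : List (List Int) :=
  let A := grid
  let A_hor := A.map List.reverse
  let A_vert := A.reverse
  let A_rot180 := A_vert.map List.reverse
  let top := (PySem.List.pyRange 0 3 1).map
    (fun i => PySem.List.pyGetD A i [] ++ PySem.List.pyGetD A_hor i [])
  let bottom := (PySem.List.pyRange 0 3 1).map
    (fun i => PySem.List.pyGetD A_vert i [] ++ PySem.List.pyGetD A_rot180 i [])
  top ++ bottom

-- ===== PORT B =====
def transform_alt (grid : List (List Int)) : List (List Int) :=
  let n : Int := grid.length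
  (PySem.List.pyRange 0 6 1).map (fun i =>
    let mi := if i < 3 then i else n - 1 - (i - 3)
    let row := PySem.List.pyGetD grid mi []
    let w : Int := row.length
    (PySem.List.pyRange 0 (2 * w) 1).map (fun j =>
      PySem.List.pyGetD row (if j < w then j else 2 * w - 1 - j) 0))

-- ===== PRECONDITION & SPEC =====
-- A raises IndexError (A[i], i in range(3)) on grids with fewer than 3 rows; exactly those are excluded.
def Pre_transform (grid : List (List Int)) : Prop := 3 ≤ grid.length
instance (grid : List (List Int)) : Decidable (Pre_transform grid) := by unfold Pre_transform; infer_instance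
def pvWitness_transform : List (List Int) := [[1, 2, 3], [4, 5, 6], [7, 8, 9]]

def Spec_transform (grid : List (List Int)) (out : List (List Int)) : Prop := out = transform_alt grid
instance (grid : List (List Int)) (out : List (List Int)) : Decidable (Spec_transform grid out) := by unfold Spec_transform; infer_instance

-- ===== CLAIM (what is proved, stated in full; the proofs are below) =====
def Claim_equal_transform : Prop := ∀ (grid : List (List Int)), Dom_transform grid → Pre_transform grid → Spec_transform grid (transform grid)

-- ===== LEMMAS AND PROOFS =====

-- B's inner comprehension over a single source row is that row followed by its reverse.
lemma mirror_row (row : List Int) :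
    (PySem.List.pyRange 0 (2 * ((row.length : Int))) 1).map (fun j =>
      PySem.List.pyGetD row (if j < ((row.length : Int)) then j else 2 * ((row.length : Int)) - 1 - j) 0)
    = row ++ row.reverse := by
  apply List.ext_getElem
  · simp [PySem.List.length_pyRange_one]
    omega
  · intro k h1 h2
    rw [List.getElem_map, PySem.List.getElem_pyRange_one, zero_add]
    by_cases hk : k < row.length
    · rw [if_pos (by exact_mod_cast hk)]
      rw [PySem.List.pyGetD_natCast, List.getD_eq_getElem _ _ hk,
        List.getElem_append_left hk]
    · have hk2 : k < 2 * row.length := by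
        have := h2; simp at this; omega
      rw [if_neg (by omega)]
      rw [show 2 * ((row.length : Int)) - 1 - ((k : Nat) : Int)
          = ((2 * row.length - 1 - k : Nat) : Int) by omega]
      rw [PySem.List.pyGetD_natCast, List.getD_eq_getElem _ _ (by omega),
        List.getElem_append_right (by omega)]
      rw [List.getElem_reverse]
      congr 1
      omega

-- one output row of B over source row 'pyGetD grid m []' equals A's 'A[m] + A_hor[m]'
lemma cell_case (grid : List (List Int)) (m : Int) (h0 : 0 ≤ m) (h1 : m < (grid.length : Int)) :
    PySem.List.pyGetD grid m [] ++ PySem.List.pyGetD (List.map List.reverse grid) m [] =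
    List.map (fun j =>
        PySem.List.pyGetD (PySem.List.pyGetD grid m [])
          (if j < ((PySem.List.pyGetD grid m []).length : Int) then j
           else 2 * ((PySem.List.pyGetD grid m []).length : Int) - 1 - j) 0)
      (PySem.List.pyRange 0 (2 * ((PySem.List.pyGetD grid m []).length : Int)) 1) := by
  rw [mirror_row]
  congr 1
  rw [PySem.List.pyGetD_eq_getElem (List.map List.reverse grid) [] h0 (by simpa using h1),
      PySem.List.pyGetD_eq_getElem grid [] h0 h1, List.getElem_map]

-- indexing the reversed grid is index reflection on the grid
lemma rev_idx (xs : List (List Int)) (k t : Int) (h0 : 0 ≤ k) (h1 : k < (xs.length : Int))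
    (ht : t = (xs.length : Int) - 1 - k) :
    PySem.List.pyGetD xs.reverse k ([] : List Int) = PySem.List.pyGetD xs t [] := by
  subst ht
  rw [PySem.List.pyGetD_eq_getElem xs.reverse [] h0 (by simpa using h1),
      PySem.List.pyGetD_eq_getElem xs [] (by omega) (by omega),
      List.getElem_reverse]
  congr 1
  omega

-- ===== VERDICT (by name: the statement is the Claim_ definition above) =====
theorem transform_spec : Claim_equal_transform := by
  intro grid _ hpre
  unfold Pre_transform at hpre
  unfold Spec_transform transform transform_alt
  simp only [show PySem.List.pyRange 0 6 1 = [0, 1, 2, 3, 4, 5] from by decide,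
             show PySem.List.pyRange 0 3 1 = [0, 1, 2] from by decide,
             List.map_cons, List.map_nil, List.cons_append, List.nil_append]
  norm_num
  refine ⟨?_, ?_, ?_, ?_, ?_, ?_⟩
  · exact cell_case grid 0 (by omega) (by omega)
  · exact cell_case grid 1 (by omega) (by omega)
  · exact cell_case grid 2 (by omega) (by omega)
  · rw [← List.map_reverse, cell_case grid.reverse 0 (by omega) (by simp; omega),
        rev_idx grid 0 ((grid.length : Int) - 1) (by omega) (by omega) (by ring)]
  · rw [← List.map_reverse, cell_case grid.reverse 1 (by omega) (by simp; omega),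
        rev_idx grid 1 ((grid.length : Int) - 1 - 1) (by omega) (by omega) (by ring)]
  · rw [← List.map_reverse, cell_case grid.reverse 2 (by omega) (by simp; omega),
        rev_idx grid 2 ((grid.length : Int) - 1 - 2) (by omega) (by omega) (by ring)]
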